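-- pv_equiv track=rewrite | github.com/P4ZD4N/codewars | rgb-to-hex-conversion/main.py | rests
-- ===== SOURCE A (Python) =====
-- def rests(x):
--     list_of_rests = []
--     if x != 0 and x >= 16 and 255 >= x:
--         while x != 0:
--             x_divided_by_16 = x // 16
--             rest_of_division = x % 16
--             list_of_rests.append(rest_of_division)
--             x = x_divided_by_16
--     elif 15 >= x and x >= 1:
--         list_of_rests.append(x)
--         list_of_rests.append(0)
--     elif x > 255:
--         for i in range(2):
--             list_of_rests.append(15)
--     else:
--         for i in range(2):
--             list_of_rests.append(0)
--     list_of_rests.reverse()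
--     return list_of_rests
-- ===== SOURCE B (Python) =====
-- def rests(x):
--     x = max(0, min(255, x))
--     return [x // 16, x % 16]
-- ===== Notes on version B (the rewrite author's own statement) =====
-- stated objective: simpler
-- what changed: Replaces the four-branch logic with a digit-collecting while loop, list building and reversal by a clamp to [0,255] followed by the closed-form base-16 digit pair [x//16, x%16].
import Mathlib
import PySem

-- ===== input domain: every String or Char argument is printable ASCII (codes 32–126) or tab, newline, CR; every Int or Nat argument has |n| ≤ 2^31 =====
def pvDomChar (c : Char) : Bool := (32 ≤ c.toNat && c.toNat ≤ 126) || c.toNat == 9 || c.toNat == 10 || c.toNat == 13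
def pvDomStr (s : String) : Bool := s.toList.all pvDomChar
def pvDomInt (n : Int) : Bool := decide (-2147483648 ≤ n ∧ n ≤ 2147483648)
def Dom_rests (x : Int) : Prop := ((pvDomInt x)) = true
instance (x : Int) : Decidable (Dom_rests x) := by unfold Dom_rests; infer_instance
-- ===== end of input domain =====

-- B replaces A's four-branch loop-and-reverse logic by a clamp to [0,255] and the closed-form digit pair [x//16, x%16] (simpler, same cost).

-- ===== PORT A =====
-- the while loop of A, with fuel to make it total (fuel only bounds iterations; A's loop runs with 16 ≤ x ≤ 255)
def restsLoopA : Nat → Int → List Int → List Int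
  | 0, _, acc => acc
  | n + 1, x, acc =>
      if x ≠ 0 then
        restsLoopA n (PySem.Int.floordiv x 16) (acc ++ [PySem.Int.mod x 16])
      else acc

def rests (x : Int) : List Int :=
  let list_of_rests : List Int := []
  if x ≠ 0 ∧ x ≥ 16 ∧ 255 ≥ x then
    (restsLoopA (x.toNat + 1) x list_of_rests).reverse
  else if 15 ≥ x ∧ x ≥ 1 then
    (list_of_rests ++ [x] ++ [0]).reverse
  else if x > 255 then
    (list_of_rests ++ [15, 15]).reverse
  else
    (list_of_rests ++ [0, 0]).reverse

-- ===== PORT B =====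
def rests_alt (x : Int) : List Int :=
  let y := max 0 (min 255 x)
  [PySem.Int.floordiv y 16, PySem.Int.mod y 16]

-- ===== PRECONDITION & SPEC =====
def Spec_rests (x : Int) (out : List Int) : Prop := out = rests_alt x
instance (x : Int) (out : List Int) : Decidable (Spec_rests x out) := by unfold Spec_rests; infer_instance

-- ===== CLAIM (what is proved, stated in full; the proofs are below) =====
def Claim_equal_rests : Prop := ∀ (x : Int), Dom_rests x → Spec_rests x (rests x)

-- ===== LEMMAS AND PROOFS =====

lemma fd16 (x : Int) : PySem.Int.floordiv x 16 = x / 16 :=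
  PySem.Int.floordiv_eq_ediv_of_pos (by norm_num)

lemma md16 (x : Int) : PySem.Int.mod x 16 = x % 16 :=
  PySem.Int.mod_eq_emod_of_pos (by norm_num)

lemma loopA_eq (x : Int) (acc : List Int) (h1 : 16 ≤ x) (h2 : x ≤ 255) (n : Nat) (hn : 3 ≤ n) :
    restsLoopA n x acc = acc ++ [PySem.Int.mod x 16, PySem.Int.floordiv x 16] := by
  obtain ⟨m, rfl⟩ : ∃ m, n = m + 3 := ⟨n - 3, by omega⟩
  have hx0 : x ≠ 0 := by omega
  have hq : PySem.Int.floordiv x 16 = x / 16 := fd16 x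
  have hqb : 1 ≤ x / 16 ∧ x / 16 ≤ 15 := by omega
  have hq0 : PySem.Int.floordiv x 16 ≠ 0 := by rw [hq]; omega
  have hqq : PySem.Int.floordiv (PySem.Int.floordiv x 16) 16 = 0 := by
    rw [hq, fd16 _]; omega
  have hqm : PySem.Int.mod (PySem.Int.floordiv x 16) 16 = PySem.Int.floordiv x 16 := by
    rw [hq, md16 _]; omega
  show restsLoopA (m + 2 + 1) x acc = _
  rw [restsLoopA, if_pos hx0]
  rw [show m + 2 = m + 1 + 1 from rfl, restsLoopA, if_pos hq0, hqm, hqq]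
  rw [restsLoopA, if_neg (by simp)]
  simp

theorem rests_spec : Claim_equal_rests := by
  intro x _
  unfold Spec_rests rests rests_alt
  by_cases hmid : x ≠ 0 ∧ x ≥ 16 ∧ 255 ≥ x
  · rw [if_pos hmid]
    obtain ⟨-, h1, h2⟩ := hmid
    rw [loopA_eq x [] h1 h2 (x.toNat + 1) (by omega)]
    have : max 0 (min 255 x) = x := by omega
    simp [this]
  · rw [if_neg hmid]
    by_cases hlo : (15:Int) ≥ x ∧ x ≥ 1
    · rw [if_pos hlo]
      have hy : max 0 (min 255 x) = x := by omega
      simp [hy]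
      omega
    · rw [if_neg hlo]
      by_cases hhi : x > 255
      · rw [if_pos hhi]
        have hy : max 0 (min 255 x) = 255 := by omega
        simp [hy]
      · rw [if_neg hhi]
        have hx0 : x ≤ 0 := by omega
        have hy : max 0 (min 255 x) = 0 := by omega
        simp [hy]
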